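-- pv_equiv track=rewrite | github.com/aledprysparry/CwisImages | app.py | split_welsh_letters
-- ===== SOURCE A (Python) =====
-- WELSH_DIGRAPHS = ["ch", "dd", "ff", "ng", "ll", "ph", "rh", "th"]
--
-- def split_welsh_letters(word):
--     word = word.lower()
--     letters = []
--     i = 0
--     while i < len(word):
--         if i + 1 < len(word) and word[i:i+2] in WELSH_DIGRAPHS:
--             letters.append(word[i:i+2])
--             i += 2
--         else:
--             letters.append(word[i])
--             i += 1
--     return letters
-- ===== SOURCE B (Python) =====
-- import re
--
-- _WELSH_TOKEN = re.compile(r'ch|dd|ff|ng|ll|ph|rh|th|.', re.DOTALL)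
--
-- def split_welsh_letters(word):
--     return _WELSH_TOKEN.findall(word.lower())
-- ===== Notes on version B (the rewrite author's own statement) =====
-- stated objective: idiomatic
-- what changed: Replaces the hand-rolled index/slice while-loop with a single regex findall whose ordered alternation (digraphs before '.') performs the same greedy left-to-right tokenization.
import Mathlib
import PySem

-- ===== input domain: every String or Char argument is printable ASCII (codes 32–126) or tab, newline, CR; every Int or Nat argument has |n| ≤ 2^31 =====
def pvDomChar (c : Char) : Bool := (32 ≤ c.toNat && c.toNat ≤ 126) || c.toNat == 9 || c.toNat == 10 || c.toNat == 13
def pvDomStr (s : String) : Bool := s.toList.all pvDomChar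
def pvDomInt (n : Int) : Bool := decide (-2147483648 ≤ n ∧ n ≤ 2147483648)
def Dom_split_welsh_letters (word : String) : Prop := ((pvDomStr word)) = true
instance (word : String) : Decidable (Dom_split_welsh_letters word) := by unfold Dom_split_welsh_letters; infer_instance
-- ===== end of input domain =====

-- B replaces A's index/slice while-loop with a regex-style tokenizer (ordered alternation: digraphs, then any single char); idiomatic, same cost.


-- ===== PORT A =====
-- WELSH_DIGRAPHS, as lists of code points
def pvWelshDigraphs : List (List Char) :=
  [['c','h'], ['d','d'], ['f','f'], ['n','g'], ['l','l'], ['p','h'], ['r','h'], ['t','h']]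

-- the while-loop: i runs over indices of the lowered word
def pvSplitGo (w : List Char) (i : Nat) : List String :=
  if h : i < w.length then
    if i + 1 < w.length ∧ PySem.List.slice w (some (i : Int)) (some ((i : Int) + 2)) ∈ pvWelshDigraphs then
      String.ofList (PySem.List.slice w (some (i : Int)) (some ((i : Int) + 2))) :: pvSplitGo w (i + 2)
    else
      String.ofList [w[i]] :: pvSplitGo w (i + 1)
  else
    []
termination_by w.length - i

def split_welsh_letters (word : String) : List String :=
  pvSplitGo (PySem.Chars.lower word.toList) 0

-- ===== PORT B =====
-- the alternation of the regex r'ch|dd|ff|ng|ll|ph|rh|th|.': digraph tokens tried first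
def pvTokens : List (List Char) :=
  [['c','h'], ['d','d'], ['f','f'], ['n','g'], ['l','l'], ['p','h'], ['r','h'], ['t','h']]

-- findall's non-overlapping left-to-right scan: at each position take the first
-- alternative that matches (a digraph, else '.' = any one char)
def pvFindall : List Char → List (List Char)
  | [] => []
  | [a] => [[a]]
  | a :: b :: rest =>
    if [a, b] ∈ pvTokens then [a, b] :: pvFindall rest
    else [a] :: pvFindall (b :: rest)

def split_welsh_letters_alt (word : String) : List String :=
  (pvFindall (PySem.Chars.lower word.toList)).map String.ofList

-- ===== PRECONDITION & SPEC =====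
def Spec_split_welsh_letters (word : String) (out : List String) : Prop := out = split_welsh_letters_alt word
instance (word : String) (out : List String) : Decidable (Spec_split_welsh_letters word out) := by unfold Spec_split_welsh_letters; infer_instance

-- ===== CLAIM (what is proved, stated in full; the proofs are below) =====
def Claim_equal_split_welsh_letters : Prop := ∀ (word : String), Dom_split_welsh_letters word → Spec_split_welsh_letters word (split_welsh_letters word)

-- ===== LEMMAS AND PROOFS =====

lemma pvSplitGo_eq (w : List Char) (i : Nat) :
    pvSplitGo w i = (pvFindall (w.drop i)).map String.ofList := by
  fun_induction pvSplitGo w i with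
  | case1 i h hc ih =>
    -- digraph branch
    obtain ⟨h1, hmem⟩ := hc
    have hslice : PySem.List.slice w (some (i : Int)) (some ((i : Int) + 2)) = (w.drop i).take 2 := by
      have := PySem.List.slice_natCast_add (xs := w) (j := i) (n := 2)
      simpa using this
    have hd1 : w.drop i = w[i] :: w.drop (i + 1) := List.drop_eq_getElem_cons h
    have hd2 : w.drop (i + 1) = w[i + 1] :: w.drop (i + 2) := List.drop_eq_getElem_cons h1
    have htake : (w.drop i).take 2 = [w[i], w[i + 1]] := by
      rw [hd1, hd2]; rfl
    rw [hslice, htake] at hmem ⊢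
    have hmem' : [w[i], w[i + 1]] ∈ pvTokens := hmem
    rw [ih, hd1, hd2, pvFindall, if_pos hmem']
    rfl
  | case2 i h hc ih =>
    -- single-char branch
    have hd1 : w.drop i = w[i] :: w.drop (i + 1) := List.drop_eq_getElem_cons h
    rw [ih, hd1]
    rcases hrest : w.drop (i + 1) with _ | ⟨b, rest⟩
    · rfl
    · have h1 : i + 1 < w.length := by
        by_contra hle
        have : w.drop (i + 1) = [] := List.drop_eq_nil_of_le (by omega)
        simp [this] at hrest
      have hd2 : w.drop (i + 1) = w[i + 1] :: w.drop (i + 2) := List.drop_eq_getElem_cons h1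
      have hb : b = w[i + 1] := by rw [hrest] at hd2; exact (List.cons.injEq ..).mp hd2 |>.1
      have hslice : PySem.List.slice w (some (i : Int)) (some ((i : Int) + 2)) = (w.drop i).take 2 := by
        have := PySem.List.slice_natCast_add (xs := w) (j := i) (n := 2)
        simpa using this
      have htake : (w.drop i).take 2 = [w[i], b] := by
        rw [hd1, hrest]; rfl
      have hnot : [w[i], b] ∉ pvTokens := by
        intro hmem
        exact hc ⟨h1, by rw [hslice, htake]; exact hmem⟩
      rw [pvFindall, if_neg hnot]
      rfl
  | case3 i h =>
    have : w.drop i = [] := List.drop_eq_nil_of_le (by omega)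
    simp [this, pvFindall]

-- ===== VERDICT (by name: the statement is the Claim_ definition above) =====
theorem split_welsh_letters_spec : Claim_equal_split_welsh_letters := by
  intro word _
  unfold Spec_split_welsh_letters split_welsh_letters split_welsh_letters_alt
  simpa using pvSplitGo_eq (PySem.Chars.lower word.toList) 0
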